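-- pv_equiv track=rewrite | github.com/shuu-tatsu/Chess | alpha-beta-depth5.py | henkan_masu_to_list
-- ===== SOURCE A (Python) =====
-- def henkan_masu_to_list(board):
--     koma_e = ["--", "--", "--", "--", "--", "--"]
--     banmen = [["--", "--", "--"],
--               ["--", "--", "--"],
--               ["--", "--", "--"],
--               ["--", "--", "--"]]
--     koma_d = ["--", "--", "--", "--", "--", "--"]
--
--     for masu, koma in board.items():
--         if masu[0] == "D" or masu[0] == "E":
--             if masu[0] == "D":
--                 okiba_d = int(masu[1]) - 1
--                 koma_d[okiba_d] = koma
--             elif masu[0] == "E":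
--                 okiba_e = int(masu[1]) - 1
--                 koma_e[okiba_e] = koma
--         else:
--             masu_in_list = masu_in_board_to_list(masu)
--             for y in range(4):
--                 for x in range(3):
--                     if str(y) + str(x) == masu_in_list:
--                         banmen[y][x] = koma
--
--     return banmen, koma_d, koma_e
--
-- def masu_in_board_to_list(masu_in_board):
--     tate = 9
--     yoko = 9
--     if masu_in_board[0] != "D" and masu_in_board[0] != "E":
--         if masu_in_board[1] == "1":
--             tate = 0
--         elif masu_in_board[1] == "2":
--             tate = 1
--         elif masu_in_board[1] == "3":
--             tate = 2
--         elif masu_in_board[1] == "4":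
--             tate = 3
--
--         if masu_in_board[0] == "A":
--             yoko = 0
--         elif masu_in_board[0] == "B":
--             yoko = 1
--         elif masu_in_board[0] == "C":
--             yoko = 2
--
--         masu_in_list =  str(tate) + str(yoko)
--         return masu_in_list
-- ===== SOURCE B (Python) =====
-- def henkan_masu_to_list(board):
--     koma_e = ["--"] * 6
--     banmen = [["--", "--", "--"] for _ in range(4)]
--     koma_d = ["--"] * 6
--     tate_map = {"1": 0, "2": 1, "3": 2, "4": 3}
--     yoko_map = {"A": 0, "B": 1, "C": 2}
--     for masu, koma in board.items():
--         c = masu[0]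
--         if c == "D":
--             koma_d[int(masu[1]) - 1] = koma
--         elif c == "E":
--             koma_e[int(masu[1]) - 1] = koma
--         else:
--             tate = tate_map.get(masu[1])
--             yoko = yoko_map.get(c)
--             if tate is not None and yoko is not None:
--                 banmen[tate][yoko] = koma
--     return banmen, koma_d, koma_e
-- ===== Notes on version B (the rewrite author's own statement) =====
-- stated objective: simpler
-- what changed: B drops A's helper that encodes the target cell as a two-digit string and the 4x3 scan comparing that string against every board cell, and instead looks the row and column up in two small maps and assigns the one cell directly.
import Mathlib
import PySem

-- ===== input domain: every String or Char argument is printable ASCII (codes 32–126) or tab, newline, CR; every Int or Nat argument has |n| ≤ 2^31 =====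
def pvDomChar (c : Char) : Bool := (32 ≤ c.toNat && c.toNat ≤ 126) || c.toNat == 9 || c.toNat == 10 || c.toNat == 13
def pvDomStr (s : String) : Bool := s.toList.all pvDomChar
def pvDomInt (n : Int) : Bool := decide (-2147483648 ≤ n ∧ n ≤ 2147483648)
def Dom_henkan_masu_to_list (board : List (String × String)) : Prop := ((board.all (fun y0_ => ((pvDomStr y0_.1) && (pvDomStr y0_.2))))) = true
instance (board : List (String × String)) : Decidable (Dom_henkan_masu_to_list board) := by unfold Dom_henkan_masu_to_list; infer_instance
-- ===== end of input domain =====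

-- B replaces A's digit-string helper plus the 4×3 cell-scanning loops with two direct
-- row/column map lookups and one indexed assignment (objective: simpler).

-- ===== PORT A =====
-- helper masu_in_board_to_list: returns None (falls off the end) when masu[0] is "D"/"E"
def masu_in_board_to_list (masu : String) : Option String :=
  let c0 := (PySem.Str.pyGet? masu 0).getD ' '   -- masu[0]; Pre_ guarantees in range
  let c1 := (PySem.Str.pyGet? masu 1).getD ' '   -- masu[1]; Pre_ guarantees in range
  if c0 ≠ 'D' ∧ c0 ≠ 'E' then
    let tate : Int :=
      if c1 = '1' then 0 else if c1 = '2' then 1 else if c1 = '3' then 2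
      else if c1 = '4' then 3 else 9
    let yoko : Int :=
      if c0 = 'A' then 0 else if c0 = 'B' then 1 else if c0 = 'C' then 2 else 9
    some (PySem.Int.toStr tate ++ PySem.Int.toStr yoko)
  else none

-- the body of A's 'for masu, koma in board.items()' loop
def pvStepA (st : List (List String) × List String × List String) (pair : String × String) :
    List (List String) × List String × List String :=
  let (banmen, koma_d, koma_e) := st
  let masu := pair.1
  let koma := pair.2
  let c0 := (PySem.Str.pyGet? masu 0).getD ' '
  if c0 = 'D' ∨ c0 = 'E' then
    if c0 = 'D' then
      -- okiba_d = int(masu[1]) - 1; koma_d[okiba_d] = koma  (a negative index wraps, as pySetD does)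
      let okiba_d := (PySem.Int.ofChars? [(PySem.Str.pyGet? masu 1).getD ' ']).getD 0 - 1
      (banmen, PySem.List.pySetD koma_d okiba_d koma, koma_e)
    else
      let okiba_e := (PySem.Int.ofChars? [(PySem.Str.pyGet? masu 1).getD ' ']).getD 0 - 1
      (banmen, koma_d, PySem.List.pySetD koma_e okiba_e koma)
  else
    let masu_in_list := masu_in_board_to_list masu
    let banmen' :=
      (PySem.List.pyRange 0 4 1).foldl
        (fun bm y =>
          (PySem.List.pyRange 0 3 1).foldl
            (fun bm x =>
              if some (PySem.Int.toStr y ++ PySem.Int.toStr x) = masu_in_list then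
                PySem.List.pySetD bm y (PySem.List.pySetD (PySem.List.pyGetD bm y []) x koma)
              else bm)
            bm)
        banmen
    (banmen', koma_d, koma_e)

def henkan_masu_to_list (board : List (String × String)) : List (List String) × List String × List String :=
  let koma_e := ["--", "--", "--", "--", "--", "--"]
  let banmen := [["--", "--", "--"], ["--", "--", "--"], ["--", "--", "--"], ["--", "--", "--"]]
  let koma_d := ["--", "--", "--", "--", "--", "--"]
  board.foldl pvStepA (banmen, koma_d, koma_e)

-- ===== PORT B =====
def pvTateMap : PySem.Dict Char Int := ⟨[('1', 0), ('2', 1), ('3', 2), ('4', 3)]⟩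
def pvYokoMap : PySem.Dict Char Int := ⟨[('A', 0), ('B', 1), ('C', 2)]⟩

-- the body of B's loop: direct map lookups, one indexed assignment
def pvStepB (st : List (List String) × List String × List String) (pair : String × String) :
    List (List String) × List String × List String :=
  let (banmen, koma_d, koma_e) := st
  let masu := pair.1
  let koma := pair.2
  let c := (PySem.Str.pyGet? masu 0).getD ' '
  if c = 'D' then
    (banmen, PySem.List.pySetD koma_d ((PySem.Int.ofChars? [(PySem.Str.pyGet? masu 1).getD ' ']).getD 0 - 1) koma, koma_e)
  else if c = 'E' then
    (banmen, koma_d, PySem.List.pySetD koma_e ((PySem.Int.ofChars? [(PySem.Str.pyGet? masu 1).getD ' ']).getD 0 - 1) koma)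
  else
    match PySem.Dict.get? pvTateMap ((PySem.Str.pyGet? masu 1).getD ' '), PySem.Dict.get? pvYokoMap c with
    | some tate, some yoko =>
        (PySem.List.pySetD banmen tate (PySem.List.pySetD (PySem.List.pyGetD banmen tate []) yoko koma), koma_d, koma_e)
    | _, _ => (banmen, koma_d, koma_e)

def henkan_masu_to_list_alt (board : List (String × String)) : List (List String) × List String × List String :=
  let koma_e := List.replicate 6 "--"
  let banmen := (List.range 4).map (fun _ => ["--", "--", "--"])
  let koma_d := List.replicate 6 "--"
  board.foldl pvStepB (banmen, koma_d, koma_e)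

-- ===== PRECONDITION & SPEC =====
-- Pre_ excludes (a) keys on which the Python raises: length < 2, or a "D"/"E" key whose second
-- character is not one of '0'..'6' (int() ValueError, or an IndexError on the hand list), and
-- (b) boards whose association list repeats a key, where the list does not faithfully represent
-- a Python dict (the dict keeps the first position with the last value).
def Pre_henkan_masu_to_list (board : List (String × String)) : Prop :=
  (board.map Prod.fst).Nodup ∧
  ∀ p ∈ board, 2 ≤ p.1.toList.length ∧
    ((p.1.toList[0]? = some 'D' ∨ p.1.toList[0]? = some 'E') →
      (p.1.toList[1]?.any fun c => '0' ≤ c && c ≤ '6') = true)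
instance (board : List (String × String)) : Decidable (Pre_henkan_masu_to_list board) := by
  unfold Pre_henkan_masu_to_list; infer_instance

def pvWitness_henkan_masu_to_list : (List (String × String)) :=
  [("A1", "FU"), ("C4", "GY"), ("D1", "KY"), ("E6", "HI"), ("ZZ", "xx")]

def Spec_henkan_masu_to_list (board : List (String × String)) (out : List (List String) × List String × List String) : Prop := out = henkan_masu_to_list_alt board
instance (board : List (String × String)) (out : List (List String) × List String × List String) : Decidable (Spec_henkan_masu_to_list board out) := by unfold Spec_henkan_masu_to_list; infer_instance

-- ===== CLAIM (what is proved, stated in full; the proofs are below) =====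
def Claim_equal_henkan_masu_to_list : Prop := ∀ (board : List (String × String)), Dom_henkan_masu_to_list board → Pre_henkan_masu_to_list board → Spec_henkan_masu_to_list board (henkan_masu_to_list board)

-- ===== LEMMAS AND PROOFS =====

-- lookup characterisations of B's two literal maps
theorem pv_tate_char (c : Char) : PySem.Dict.get? pvTateMap c
    = if c='1' then some 0 else if c='2' then some 1 else if c='3' then some 2 else if c='4' then some 3 else none := by
  by_cases h1 : c='1' <;> by_cases h2 : c='2' <;> by_cases h3 : c='3' <;> by_cases h4 : c='4' <;>
    simp_all [pvTateMap, PySem.Dict.get?, List.find?, beq_eq_decide, eq_comm]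

theorem pv_yoko_char (c : Char) : PySem.Dict.get? pvYokoMap c
    = if c='A' then some 0 else if c='B' then some 1 else if c='C' then some 2 else none := by
  by_cases h1 : c='A' <;> by_cases h2 : c='B' <;> by_cases h3 : c='C' <;>
    simp_all [pvYokoMap, PySem.Dict.get?, List.find?, beq_eq_decide, eq_comm]

-- the two loop bodies agree on EVERY state and pair
theorem pv_step_eq (st : List (List String) × List String × List String) (pair : String × String) :
    pvStepA st pair = pvStepB st pair := by
  obtain ⟨banmen, koma_d, koma_e⟩ := st
  obtain ⟨m, k⟩ := pair
  unfold pvStepA pvStepB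
  by_cases hD : (PySem.List.pyGet? m.toList (0 : Int)).getD ' ' = 'D'
  · simp [hD]
  by_cases hE : (PySem.List.pyGet? m.toList (0 : Int)).getD ' ' = 'E'
  · simp [hD, hE]
  have hr4 : PySem.List.pyRange 0 4 1 = [0, 1, 2, 3] := by decide
  have hr3 : PySem.List.pyRange 0 3 1 = [0, 1, 2] := by decide
  by_cases h1 : (PySem.List.pyGet? m.toList (1 : Int)).getD ' ' = '1'
  · by_cases hA : (PySem.List.pyGet? m.toList (0 : Int)).getD ' ' = 'A'
    · simp [hD, hE, masu_in_board_to_list, pv_tate_char, pv_yoko_char, hr4, hr3, List.foldl, show PySem.Int.toStr 0 = "0" from rfl, show PySem.Int.toStr 1 = "1" from rfl, show PySem.Int.toStr 2 = "2" from rfl, show PySem.Int.toStr 3 = "3" from rfl, show PySem.Int.toStr 9 = "9" from rfl, h1, hA]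
    · by_cases hB : (PySem.List.pyGet? m.toList (0 : Int)).getD ' ' = 'B'
      · simp [hD, hE, masu_in_board_to_list, pv_tate_char, pv_yoko_char, hr4, hr3, List.foldl, show PySem.Int.toStr 0 = "0" from rfl, show PySem.Int.toStr 1 = "1" from rfl, show PySem.Int.toStr 2 = "2" from rfl, show PySem.Int.toStr 3 = "3" from rfl, show PySem.Int.toStr 9 = "9" from rfl, h1, hA, hB]
      · by_cases hC : (PySem.List.pyGet? m.toList (0 : Int)).getD ' ' = 'C'
        · simp [hD, hE, masu_in_board_to_list, pv_tate_char, pv_yoko_char, hr4, hr3, List.foldl, show PySem.Int.toStr 0 = "0" from rfl, show PySem.Int.toStr 1 = "1" from rfl, show PySem.Int.toStr 2 = "2" from rfl, show PySem.Int.toStr 3 = "3" from rfl, show PySem.Int.toStr 9 = "9" from rfl, h1, hA, hB, hC]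
        · simp [hD, hE, masu_in_board_to_list, pv_tate_char, pv_yoko_char, hr4, hr3, List.foldl, show PySem.Int.toStr 0 = "0" from rfl, show PySem.Int.toStr 1 = "1" from rfl, show PySem.Int.toStr 2 = "2" from rfl, show PySem.Int.toStr 3 = "3" from rfl, show PySem.Int.toStr 9 = "9" from rfl, h1, hA, hB, hC]
  · by_cases h2 : (PySem.List.pyGet? m.toList (1 : Int)).getD ' ' = '2'
    · by_cases hA : (PySem.List.pyGet? m.toList (0 : Int)).getD ' ' = 'A'
      · simp [hD, hE, masu_in_board_to_list, pv_tate_char, pv_yoko_char, hr4, hr3, List.foldl, show PySem.Int.toStr 0 = "0" from rfl, show PySem.Int.toStr 1 = "1" from rfl, show PySem.Int.toStr 2 = "2" from rfl, show PySem.Int.toStr 3 = "3" from rfl, show PySem.Int.toStr 9 = "9" from rfl, h1, h2, hA]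
      · by_cases hB : (PySem.List.pyGet? m.toList (0 : Int)).getD ' ' = 'B'
        · simp [hD, hE, masu_in_board_to_list, pv_tate_char, pv_yoko_char, hr4, hr3, List.foldl, show PySem.Int.toStr 0 = "0" from rfl, show PySem.Int.toStr 1 = "1" from rfl, show PySem.Int.toStr 2 = "2" from rfl, show PySem.Int.toStr 3 = "3" from rfl, show PySem.Int.toStr 9 = "9" from rfl, h1, h2, hA, hB]
        · by_cases hC : (PySem.List.pyGet? m.toList (0 : Int)).getD ' ' = 'C'
          · simp [hD, hE, masu_in_board_to_list, pv_tate_char, pv_yoko_char, hr4, hr3, List.foldl, show PySem.Int.toStr 0 = "0" from rfl, show PySem.Int.toStr 1 = "1" from rfl, show PySem.Int.toStr 2 = "2" from rfl, show PySem.Int.toStr 3 = "3" from rfl, show PySem.Int.toStr 9 = "9" from rfl, h1, h2, hA, hB, hC]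
          · simp [hD, hE, masu_in_board_to_list, pv_tate_char, pv_yoko_char, hr4, hr3, List.foldl, show PySem.Int.toStr 0 = "0" from rfl, show PySem.Int.toStr 1 = "1" from rfl, show PySem.Int.toStr 2 = "2" from rfl, show PySem.Int.toStr 3 = "3" from rfl, show PySem.Int.toStr 9 = "9" from rfl, h1, h2, hA, hB, hC]
    · by_cases h3 : (PySem.List.pyGet? m.toList (1 : Int)).getD ' ' = '3'
      · by_cases hA : (PySem.List.pyGet? m.toList (0 : Int)).getD ' ' = 'A'
        · simp [hD, hE, masu_in_board_to_list, pv_tate_char, pv_yoko_char, hr4, hr3, List.foldl, show PySem.Int.toStr 0 = "0" from rfl, show PySem.Int.toStr 1 = "1" from rfl, show PySem.Int.toStr 2 = "2" from rfl, show PySem.Int.toStr 3 = "3" from rfl, show PySem.Int.toStr 9 = "9" from rfl, h1, h2, h3, hA]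
        · by_cases hB : (PySem.List.pyGet? m.toList (0 : Int)).getD ' ' = 'B'
          · simp [hD, hE, masu_in_board_to_list, pv_tate_char, pv_yoko_char, hr4, hr3, List.foldl, show PySem.Int.toStr 0 = "0" from rfl, show PySem.Int.toStr 1 = "1" from rfl, show PySem.Int.toStr 2 = "2" from rfl, show PySem.Int.toStr 3 = "3" from rfl, show PySem.Int.toStr 9 = "9" from rfl, h1, h2, h3, hA, hB]
          · by_cases hC : (PySem.List.pyGet? m.toList (0 : Int)).getD ' ' = 'C'
            · simp [hD, hE, masu_in_board_to_list, pv_tate_char, pv_yoko_char, hr4, hr3, List.foldl, show PySem.Int.toStr 0 = "0" from rfl, show PySem.Int.toStr 1 = "1" from rfl, show PySem.Int.toStr 2 = "2" from rfl, show PySem.Int.toStr 3 = "3" from rfl, show PySem.Int.toStr 9 = "9" from rfl, h1, h2, h3, hA, hB, hC]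
            · simp [hD, hE, masu_in_board_to_list, pv_tate_char, pv_yoko_char, hr4, hr3, List.foldl, show PySem.Int.toStr 0 = "0" from rfl, show PySem.Int.toStr 1 = "1" from rfl, show PySem.Int.toStr 2 = "2" from rfl, show PySem.Int.toStr 3 = "3" from rfl, show PySem.Int.toStr 9 = "9" from rfl, h1, h2, h3, hA, hB, hC]
      · by_cases h4 : (PySem.List.pyGet? m.toList (1 : Int)).getD ' ' = '4'
        · by_cases hA : (PySem.List.pyGet? m.toList (0 : Int)).getD ' ' = 'A'
          · simp [hD, hE, masu_in_board_to_list, pv_tate_char, pv_yoko_char, hr4, hr3, List.foldl, show PySem.Int.toStr 0 = "0" from rfl, show PySem.Int.toStr 1 = "1" from rfl, show PySem.Int.toStr 2 = "2" from rfl, show PySem.Int.toStr 3 = "3" from rfl, show PySem.Int.toStr 9 = "9" from rfl, h1, h2, h3, h4, hA]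
          · by_cases hB : (PySem.List.pyGet? m.toList (0 : Int)).getD ' ' = 'B'
            · simp [hD, hE, masu_in_board_to_list, pv_tate_char, pv_yoko_char, hr4, hr3, List.foldl, show PySem.Int.toStr 0 = "0" from rfl, show PySem.Int.toStr 1 = "1" from rfl, show PySem.Int.toStr 2 = "2" from rfl, show PySem.Int.toStr 3 = "3" from rfl, show PySem.Int.toStr 9 = "9" from rfl, h1, h2, h3, h4, hA, hB]
            · by_cases hC : (PySem.List.pyGet? m.toList (0 : Int)).getD ' ' = 'C'
              · simp [hD, hE, masu_in_board_to_list, pv_tate_char, pv_yoko_char, hr4, hr3, List.foldl, show PySem.Int.toStr 0 = "0" from rfl, show PySem.Int.toStr 1 = "1" from rfl, show PySem.Int.toStr 2 = "2" from rfl, show PySem.Int.toStr 3 = "3" from rfl, show PySem.Int.toStr 9 = "9" from rfl, h1, h2, h3, h4, hA, hB, hC]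
              · simp [hD, hE, masu_in_board_to_list, pv_tate_char, pv_yoko_char, hr4, hr3, List.foldl, show PySem.Int.toStr 0 = "0" from rfl, show PySem.Int.toStr 1 = "1" from rfl, show PySem.Int.toStr 2 = "2" from rfl, show PySem.Int.toStr 3 = "3" from rfl, show PySem.Int.toStr 9 = "9" from rfl, h1, h2, h3, h4, hA, hB, hC]
        · by_cases hA : (PySem.List.pyGet? m.toList (0 : Int)).getD ' ' = 'A'
          · simp [hD, hE, masu_in_board_to_list, pv_tate_char, pv_yoko_char, hr4, hr3, List.foldl, show PySem.Int.toStr 0 = "0" from rfl, show PySem.Int.toStr 1 = "1" from rfl, show PySem.Int.toStr 2 = "2" from rfl, show PySem.Int.toStr 3 = "3" from rfl, show PySem.Int.toStr 9 = "9" from rfl, h1, h2, h3, h4, hA]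
          · by_cases hB : (PySem.List.pyGet? m.toList (0 : Int)).getD ' ' = 'B'
            · simp [hD, hE, masu_in_board_to_list, pv_tate_char, pv_yoko_char, hr4, hr3, List.foldl, show PySem.Int.toStr 0 = "0" from rfl, show PySem.Int.toStr 1 = "1" from rfl, show PySem.Int.toStr 2 = "2" from rfl, show PySem.Int.toStr 3 = "3" from rfl, show PySem.Int.toStr 9 = "9" from rfl, h1, h2, h3, h4, hA, hB]
            · by_cases hC : (PySem.List.pyGet? m.toList (0 : Int)).getD ' ' = 'C'
              · simp [hD, hE, masu_in_board_to_list, pv_tate_char, pv_yoko_char, hr4, hr3, List.foldl, show PySem.Int.toStr 0 = "0" from rfl, show PySem.Int.toStr 1 = "1" from rfl, show PySem.Int.toStr 2 = "2" from rfl, show PySem.Int.toStr 3 = "3" from rfl, show PySem.Int.toStr 9 = "9" from rfl, h1, h2, h3, h4, hA, hB, hC]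
              · simp [hD, hE, masu_in_board_to_list, pv_tate_char, pv_yoko_char, hr4, hr3, List.foldl, show PySem.Int.toStr 0 = "0" from rfl, show PySem.Int.toStr 1 = "1" from rfl, show PySem.Int.toStr 2 = "2" from rfl, show PySem.Int.toStr 3 = "3" from rfl, show PySem.Int.toStr 9 = "9" from rfl, h1, h2, h3, h4, hA, hB, hC]

theorem pv_fold_eq (l : List (String × String)) (st : List (List String) × List String × List String) :
    l.foldl pvStepA st = l.foldl pvStepB st := by
  induction l generalizing st with
  | nil => rfl
  | cons p rest ih => rw [List.foldl_cons, List.foldl_cons, pv_step_eq]; exact ih _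

-- ===== VERDICT (by name: the statement is the Claim_ definition above) =====
theorem henkan_masu_to_list_spec : Claim_equal_henkan_masu_to_list := by
  intro board _ _
  unfold Spec_henkan_masu_to_list henkan_masu_to_list henkan_masu_to_list_alt
  exact pv_fold_eq board _
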